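-- pv_equiv track=rewrite | github.com/se2p/pynguin | docs/source/_static/typeevalpy-example/compiler.py | interpret_mode
-- ===== SOURCE A (Python) =====
-- from typing import Iterable
--
-- def interpret_mode(doc: str) -> Iterable[str]:
--     """Replace interpreter syntax."""
--     keep = False
--     lines = doc.split('\n')
--     for i, line in enumerate(lines):
--         signed = line.startswith(">>> ")
--         if signed:
--             line = line[len(">>> "):]
--             if not keep:
--                 yield "```python"
--                 keep = True
--         elif keep:
--             yield "```\n"
--             keep = False
--         yield line
--         if signed and i == len(lines) - 1:
--             yield "```\n"
--             keep = False
-- ===== SOURCE B (Python) =====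
-- def interpret_mode(doc: str):
--     """Replace interpreter syntax (run-buffering rewrite: collect each maximal
--     run of '>>> ' lines and flush it as one fenced block)."""
--     out = []
--     run = []  # pending stripped lines of the current '>>> ' run
--     for line in doc.split('\n'):
--         if line.startswith('>>> '):
--             run.append(line[4:])
--         else:
--             if run:
--                 out.append('```python')
--                 out.extend(run)
--                 out.append('```\n')
--                 run = []
--             out.append(line)
--     if run:
--         out.append('```python')
--         out.extend(run)
--         out.append('```\n')
--     return out
-- ===== Notes on version B (the rewrite author's own statement) =====
-- stated objective: alternative
-- what changed: B buffers each maximal run of interpreter-prompt lines in a list and flushes it as one fenced block (at an unsigned line or at the end), replacing A's per-line keep flag and its i == len(lines)-1 last-line special case.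
import Mathlib
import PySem

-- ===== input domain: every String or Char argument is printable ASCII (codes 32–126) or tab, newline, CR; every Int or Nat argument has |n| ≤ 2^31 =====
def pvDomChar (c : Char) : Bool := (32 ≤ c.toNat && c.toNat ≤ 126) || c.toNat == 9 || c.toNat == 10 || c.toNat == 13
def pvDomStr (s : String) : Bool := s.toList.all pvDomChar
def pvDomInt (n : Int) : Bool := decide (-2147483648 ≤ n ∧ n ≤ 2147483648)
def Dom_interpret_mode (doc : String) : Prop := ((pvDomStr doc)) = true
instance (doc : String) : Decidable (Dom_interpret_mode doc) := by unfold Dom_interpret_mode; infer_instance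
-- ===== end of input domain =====

-- B buffers each maximal run of interpreter-prompt lines and flushes it as one fenced block,
-- replacing A's per-line keep flag and last-index special case (objective: alternative).

-- ===== PORT A =====
-- one iteration of A's loop body; state = (yielded lines so far, keep)
def stepA (N : Int) (st : List String × Bool) (p : Int × String) : List String × Bool :=
  let signed := PySem.Str.startswith p.2 ">>> "
  if signed then
    let line := PySem.Str.slice p.2 (some 4) none
    let st := if !st.2 then (st.1 ++ ["```python"], true) else st
    let st := (st.1 ++ [line], st.2)
    if p.1 = N - 1 then (st.1 ++ ["```\n"], false) else st
  else
    let st := if st.2 then (st.1 ++ ["```\n"], false) else st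
    (st.1 ++ [p.2], st.2)

def interpret_mode (doc : String) : List String :=
  -- sep is the literal "\n" (nonempty), so split? is always some; getD never applies
  let lines := (PySem.Str.split? doc "\n").getD []
  ((PySem.List.enumerate lines).foldl (stepA (lines.length : Int)) ([], false)).1

-- ===== PORT B =====
-- B's flush of a pending run ('if run: out += [fence] + run + [closing]')
def flushB (out run : List String) : List String :=
  if run.isEmpty then out else out ++ ["```python"] ++ run ++ ["```\n"]

-- one iteration of B's loop body; state = (out, pending run)
def stepB (st : List String × List String) (line : String) : List String × List String :=
  if PySem.Str.startswith line ">>> " then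
    (st.1, st.2 ++ [PySem.Str.slice line (some 4) none])
  else
    (flushB st.1 st.2 ++ [line], [])

def interpret_mode_alt (doc : String) : List String :=
  let q := ((PySem.Str.split? doc "\n").getD []).foldl stepB ([], [])
  flushB q.1 q.2

-- ===== PRECONDITION & SPEC =====
def Spec_interpret_mode (doc : String) (out : List String) : Prop := out = interpret_mode_alt doc
instance (doc : String) (out : List String) : Decidable (Spec_interpret_mode doc out) := by unfold Spec_interpret_mode; infer_instance

-- ===== CLAIM (what is proved, stated in full; the proofs are below) =====
def Claim_equal_interpret_mode : Prop := ∀ (doc : String), Dom_interpret_mode doc → Spec_interpret_mode doc (interpret_mode doc)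

-- ===== LEMMAS AND PROOFS =====
-- the lines A has already emitted for B's pending run (open fence + stripped lines, no closing yet)
def openRun (run : List String) : List String :=
  if run.isEmpty then [] else "```python" :: run

lemma loop_eq (ls : List String) : ∀ (s : Int) (out run : List String),
    (ls = [] → run = []) →
    ((PySem.List.enumerate ls s).foldl (stepA (s + (ls.length : Int))) (out ++ openRun run, !run.isEmpty)).1
      = (let q := ls.foldl stepB (out, run); flushB q.1 q.2) := by
  induction ls with
  | nil =>
    intro s out run h
    simp [PySem.List.enumerate, openRun, flushB, h rfl]
  | cons l rest ih =>
    intro s out run _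
    rw [PySem.List.enumerate_cons]
    simp only [List.foldl_cons]
    by_cases hs : PySem.Str.startswith l ">>> " = true
    · -- signed line: B appends the stripped line to the run
      set x := PySem.Str.slice l (some 4) none with hx
      have hstate : stepA (s + ((l :: rest).length : Int)) (out ++ openRun run, !run.isEmpty) (s, l)
          = (if rest = [] then (out ++ openRun (run ++ [x]) ++ ["```\n"], false)
             else (out ++ openRun (run ++ [x]), true)) := by
        rcases rest with _ | ⟨r, rs⟩
        · simp only [stepA, hs, if_true, ← hx]
          cases run with
          | nil => simp [openRun]
          | cons a as => simp [openRun]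
        · have hne : ¬ (s = s + (((l :: r :: rs).length : Int)) - 1) := by
            simp only [List.length_cons]; push_cast; omega
          simp only [stepA, hs, if_true, ← hx, if_neg hne]
          cases run with
          | nil => simp [openRun]
          | cons a as => simp [openRun]
      rw [hstate]
      rcases rest with _ | ⟨r, rs⟩
      · simp only [PySem.List.enumerate_nil, List.foldl_nil, stepB, hs, if_true, ← hx]
        cases run with
        | nil => simp [openRun, flushB]
        | cons a as => simp [openRun, flushB]
      · simp only [if_neg (by simp : ¬ (r :: rs = ([] : List String)))]
        have hrun : (!(run ++ [x]).isEmpty) = true := by simp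
        have hN : s + (((l :: r :: rs).length : Int)) = (s + 1) + (((r :: rs).length : Int)) := by
          simp only [List.length_cons]; push_cast; omega
        rw [hN, ← hrun]
        rw [ih (s + 1) out (run ++ [x]) (by intro h; exact absurd h (by simp))]
        simp only [stepB, hs, if_true, ← hx]
    · -- unsigned line: B flushes the pending run then emits the line
      have hstate : stepA (s + ((l :: rest).length : Int)) (out ++ openRun run, !run.isEmpty) (s, l)
          = (flushB out run ++ [l], false) := by
        simp only [stepA, hs]
        cases run with
        | nil => simp [openRun, flushB]
        | cons a as => simp [openRun, flushB]
      rw [hstate]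
      have hN : s + (((l :: rest).length : Int)) = (s + 1) + ((rest.length : Int)) := by
        simp only [List.length_cons]; push_cast; omega
      have h0 : (flushB out run ++ [l], false)
          = (flushB out run ++ [l] ++ openRun ([] : List String), !([] : List String).isEmpty) := by
        simp [openRun]
      rw [hN, h0, ih (s + 1) (flushB out run ++ [l]) [] (fun _ => rfl)]
      simp only [stepB]
      rw [if_neg hs]

-- ===== VERDICT (by name: the statement is the Claim_ definition above) =====
theorem interpret_mode_spec : Claim_equal_interpret_mode := by
  intro doc _
  unfold Spec_interpret_mode interpret_mode interpret_mode_alt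
  have h := loop_eq ((PySem.Str.split? doc "\n").getD []) 0 [] [] (fun _ => rfl)
  simp only [openRun, List.isEmpty_nil, if_true, List.append_nil, zero_add] at h
  simpa using h
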